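-- pv_equiv track=rewrite | github.com/TomekTarczynski/nlp-tokenizer | 02_bpe_tokenizer.py | apply_merge_to_tokens
-- ===== SOURCE A (Python) =====
-- def apply_merge_to_tokens(tokens: list[int], merge_pair: tuple[int, int], new_token_id: int) -> list[int]:
--     """Applies a token merge to a list of tokens, replacing consecutive token pairs with a new token."""
--     new_tokens = []
--     i = 0
--     while i < len(tokens):
--         if i < len(tokens) - 1 and tokens[i] == merge_pair[0] and tokens[i + 1] == merge_pair[1]:
--             new_tokens.append(new_token_id)
--             i += 2
--         else:
--             new_tokens.append(tokens[i])
--             i += 1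
--     return new_tokens
-- ===== SOURCE B (Python) =====
-- def apply_merge_to_tokens(tokens: list[int], merge_pair: tuple[int, int], new_token_id: int) -> list[int]:
--     """Two-pass: first record the greedy left-to-right merge start indices, then rebuild the list."""
--     n = len(tokens)
--     first, second = merge_pair
--     starts = set()
--     i = 0
--     while i < n - 1:
--         if tokens[i] == first and tokens[i + 1] == second:
--             starts.add(i)
--             i += 2
--         else:
--             i += 1
--     out = []
--     j = 0
--     while j < n:
--         if j in starts:
--             out.append(new_token_id)
--             j += 2
--         else:
--             out.append(tokens[j])
--             j += 1
--     return out
-- ===== Notes on version B (the rewrite author's own statement) =====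
-- stated objective: alternative
-- what changed: Replaces A's fused scan-and-build loop by two separate passes: a first pass records the greedy merge start indices into a set, a second pass rebuilds the output from that set.
import Mathlib
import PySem

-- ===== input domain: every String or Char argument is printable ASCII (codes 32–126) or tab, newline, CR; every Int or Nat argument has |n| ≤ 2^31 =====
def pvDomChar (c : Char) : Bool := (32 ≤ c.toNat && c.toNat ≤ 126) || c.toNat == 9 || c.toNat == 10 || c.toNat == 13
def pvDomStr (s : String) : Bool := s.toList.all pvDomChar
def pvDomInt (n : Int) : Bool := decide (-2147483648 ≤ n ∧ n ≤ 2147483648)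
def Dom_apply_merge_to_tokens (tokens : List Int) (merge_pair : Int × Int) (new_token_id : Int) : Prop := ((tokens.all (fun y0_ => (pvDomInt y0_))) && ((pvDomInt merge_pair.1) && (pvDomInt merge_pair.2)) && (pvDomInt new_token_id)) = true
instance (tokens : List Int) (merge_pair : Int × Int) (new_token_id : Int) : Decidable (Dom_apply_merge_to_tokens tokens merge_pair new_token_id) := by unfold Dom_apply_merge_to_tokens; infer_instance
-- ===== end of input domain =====

-- B replaces A's fused scan-and-build loop by two passes (collect greedy merge start
-- indices into a set, then rebuild from that set); objective: alternative decomposition.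

-- ===== PORT A =====
-- A's single while loop with index i and accumulator new_tokens.
def pvAGo (tokens : List Int) (mp : Int × Int) (nid : Int) (i : Nat) (acc : List Int) : List Int :=
  if _h : i < tokens.length then
    if i < tokens.length - 1 ∧ tokens.getD i 0 = mp.1 ∧ tokens.getD (i+1) 0 = mp.2 then
      pvAGo tokens mp nid (i+2) (acc ++ [nid])
    else
      pvAGo tokens mp nid (i+1) (acc ++ [tokens.getD i 0])
  else acc
termination_by tokens.length - i
decreasing_by all_goals omega

def apply_merge_to_tokens (tokens : List Int) (merge_pair : Int × Int) (new_token_id : Int) : List Int :=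
  pvAGo tokens merge_pair new_token_id 0 []

-- ===== PORT B =====
-- B's first pass: record greedy merge start indices into a set.
def pvPass1 (tokens : List Int) (first second : Int) (i : Nat) (starts : PySem.Set Int) : PySem.Set Int :=
  if h : i < tokens.length - 1 then
    if tokens.getD i 0 = first ∧ tokens.getD (i+1) 0 = second then
      pvPass1 tokens first second (i+2) (PySem.Set.add starts (i : Int))
    else
      pvPass1 tokens first second (i+1) starts
  else starts
termination_by tokens.length - i
decreasing_by all_goals omega

-- B's second pass: rebuild the token list from the recorded start indices.
def pvPass2 (tokens : List Int) (nid : Int) (starts : PySem.Set Int) (j : Nat) (out : List Int) : List Int :=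
  if _h : j < tokens.length then
    if PySem.Set.contains starts (j : Int) then
      pvPass2 tokens nid starts (j+2) (out ++ [nid])
    else
      pvPass2 tokens nid starts (j+1) (out ++ [tokens.getD j 0])
  else out
termination_by tokens.length - j
decreasing_by all_goals omega

def apply_merge_to_tokens_alt (tokens : List Int) (merge_pair : Int × Int) (new_token_id : Int) : List Int :=
  pvPass2 tokens new_token_id (pvPass1 tokens merge_pair.1 merge_pair.2 0 PySem.Set.empty) 0 []

-- ===== PRECONDITION & SPEC =====
def Spec_apply_merge_to_tokens (tokens : List Int) (merge_pair : Int × Int) (new_token_id : Int) (out : List Int) : Prop := out = apply_merge_to_tokens_alt tokens merge_pair new_token_id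
instance (tokens : List Int) (merge_pair : Int × Int) (new_token_id : Int) (out : List Int) : Decidable (Spec_apply_merge_to_tokens tokens merge_pair new_token_id out) := by unfold Spec_apply_merge_to_tokens; infer_instance

-- ===== CLAIM (what is proved, stated in full; the proofs are below) =====
def Claim_equal_apply_merge_to_tokens : Prop := ∀ (tokens : List Int) (merge_pair : Int × Int) (new_token_id : Int), Dom_apply_merge_to_tokens tokens merge_pair new_token_id → Spec_apply_merge_to_tokens tokens merge_pair new_token_id (apply_merge_to_tokens tokens merge_pair new_token_id)

-- ===== LEMMAS AND PROOFS =====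

-- Common reference recursion: the merged list from position i.
def pvMerge (tokens : List Int) (a b nid : Int) (i : Nat) : List Int :=
  if h : i < tokens.length then
    if i < tokens.length - 1 ∧ tokens.getD i 0 = a ∧ tokens.getD (i+1) 0 = b then
      nid :: pvMerge tokens a b nid (i+2)
    else
      tokens.getD i 0 :: pvMerge tokens a b nid (i+1)
  else []
termination_by tokens.length - i
decreasing_by all_goals omega

-- Greedy merge start indices from position i (as Ints, like the Python set holds).
def pvGS (tokens : List Int) (a b : Int) (i : Nat) : List Int :=
  if h : i < tokens.length - 1 then
    if tokens.getD i 0 = a ∧ tokens.getD (i+1) 0 = b then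
      (i : Int) :: pvGS tokens a b (i+2)
    else
      pvGS tokens a b (i+1)
  else []
termination_by tokens.length - i
decreasing_by all_goals omega

theorem pvAGo_eq (tokens : List Int) (mp : Int × Int) (nid : Int) (i : Nat) (acc : List Int) :
    pvAGo tokens mp nid i acc = acc ++ pvMerge tokens mp.1 mp.2 nid i := by
  fun_induction pvAGo tokens mp nid i acc with
  | case1 i acc h hc ih => rw [pvMerge, dif_pos h, if_pos hc, ih]; simp
  | case2 i acc h hc ih => rw [pvMerge, dif_pos h, if_neg hc, ih]; simp
  | case3 i acc h => rw [pvMerge, dif_neg h]; simp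

theorem pvGS_ge (tokens : List Int) (a b : Int) (i : Nat) :
    ∀ x ∈ pvGS tokens a b i, (i : Int) ≤ x := by
  fun_induction pvGS tokens a b i with
  | case1 i h hc ih =>
    intro x hx
    rcases List.mem_cons.mp hx with rfl | hx
    · omega
    · have := ih x hx; omega
  | case2 i h hc ih =>
    intro x hx; have := ih x hx; omega
  | case3 i h => intro x hx; simp at hx

theorem pvPass1_mem (tokens : List Int) (a b : Int) (i : Nat) (s : PySem.Set Int) (k : Int) :
    k ∈ pvPass1 tokens a b i s ↔ k ∈ s ∨ k ∈ pvGS tokens a b i := by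
  fun_induction pvPass1 tokens a b i s with
  | case1 i s h hc ih =>
    rw [pvGS, dif_pos h, if_pos hc]
    rw [ih, PySem.Set.mem_add]
    simp only [List.mem_cons]
    tauto
  | case2 i s h hc ih =>
    rw [pvGS, dif_pos h, if_neg hc, ih]
  | case3 i s h =>
    rw [pvGS, dif_neg h]; simp

theorem pvPass2_eq (tokens : List Int) (a b nid : Int) (S : PySem.Set Int) (j : Nat) (out : List Int)
    (hinv : ∀ k : Int, (j : Int) ≤ k → (k ∈ S ↔ k ∈ pvGS tokens a b j)) :
    pvPass2 tokens nid S j out = out ++ pvMerge tokens a b nid j := by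
  fun_induction pvPass2 tokens nid S j out with
  | case1 j out h hmem ih =>
    -- j ∈ S, so the greedy condition holds at j
    have hmem' : (j : Int) ∈ S := by simpa using hmem
    have hj : (j : Int) ∈ pvGS tokens a b j := (hinv _ le_rfl).mp hmem'
    have hcond : j < tokens.length - 1 ∧ tokens.getD j 0 = a ∧ tokens.getD (j+1) 0 = b := by
      rw [pvGS] at hj
      split at hj
      · split at hj
        · rcases List.mem_cons.mp hj with _ | hj
          · exact ⟨by omega, by tauto⟩
          · have := pvGS_ge tokens a b (j+2) _ hj; omega
        · have := pvGS_ge tokens a b (j+1) _ hj; omega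
      · simp at hj
    have hgs : pvGS tokens a b j = (j : Int) :: pvGS tokens a b (j+2) := by
      rw [pvGS, dif_pos hcond.1, if_pos hcond.2]
    have ih' := ih (by
      intro k hk
      rw [hinv k (by omega), hgs]
      simp only [List.mem_cons]
      constructor
      · rintro (rfl | hx)
        · omega
        · exact hx
      · intro hx; exact Or.inr hx)
    rw [pvMerge, dif_pos h, if_pos hcond, ih']
    simp
  | case2 j out h hmem ih =>
    have hmem' : (j : Int) ∉ S := by simpa using hmem
    have hj : (j : Int) ∉ pvGS tokens a b j := fun hg => hmem' ((hinv _ le_rfl).mpr hg)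
    have hcond : ¬ (j < tokens.length - 1 ∧ tokens.getD j 0 = a ∧ tokens.getD (j+1) 0 = b) := by
      intro hc
      apply hj
      rw [pvGS, dif_pos hc.1, if_pos hc.2]
      exact List.mem_cons_self
    have hgs : pvGS tokens a b j = pvGS tokens a b (j+1) := by
      by_cases h1 : j < tokens.length - 1
      · rw [pvGS, dif_pos h1, if_neg (by tauto)]
      · rw [pvGS, dif_neg h1, pvGS, dif_neg (by omega)]
    have ih' := ih (by
      intro k hk
      rw [hinv k (by omega), hgs])
    rw [pvMerge, dif_pos h, if_neg hcond, ih']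
    simp
  | case3 j out h =>
    rw [pvMerge, dif_neg h]; simp

-- ===== VERDICT (by name: the statement is the Claim_ definition above) =====
theorem apply_merge_to_tokens_spec : Claim_equal_apply_merge_to_tokens := by
  intro tokens mp nid _
  unfold Spec_apply_merge_to_tokens apply_merge_to_tokens apply_merge_to_tokens_alt
  rw [pvAGo_eq, pvPass2_eq tokens mp.1 mp.2 nid]
  intro k hk
  rw [pvPass1_mem]
  simp [PySem.Set.empty]
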